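-- pv_equiv track=rewrite | github.com/miguelserra14/smtuc_projeto | src/population/_common.py | infer_bgri_id_col
-- ===== SOURCE A (Python) =====
-- def infer_bgri_id_col(columns) -> str:
--     """
--     Infer BGRI ID column from available columns.
--
--     Args:
--         columns: Column names
--
--     Returns:
--         Name of BGRI ID column
--     """
--     cols = list(columns)
--     if "BGRI2021" in cols:
--         return "BGRI2021"
--     for c in cols:
--         if "BGRI" in c.upper():
--             return c
--     raise ValueError("Não foi possível inferir a coluna identificadora BGRI.")
-- ===== SOURCE B (Python) =====
-- def infer_bgri_id_col(columns) -> str: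
--     """Single pass: return 'BGRI2021' immediately on an exact match, else remember
--     the first column whose upper-case form contains 'BGRI'."""
--     first_match = None
--     for c in columns:
--         if c == "BGRI2021":
--             return c
--         if first_match is None and "BGRI" in c.upper():
--             first_match = c
--     if first_match is not None:
--         return first_match
--     raise ValueError("Não foi possível inferir a coluna identificadora BGRI.")
-- ===== Notes on version B (the rewrite author's own statement) =====
-- stated objective: simpler
-- what changed: Replaces A's membership test plus separate scan with one single pass that returns on an exact 'BGRI2021' match and otherwise remembers the first 'BGRI'-containing column.
import Mathlib
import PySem

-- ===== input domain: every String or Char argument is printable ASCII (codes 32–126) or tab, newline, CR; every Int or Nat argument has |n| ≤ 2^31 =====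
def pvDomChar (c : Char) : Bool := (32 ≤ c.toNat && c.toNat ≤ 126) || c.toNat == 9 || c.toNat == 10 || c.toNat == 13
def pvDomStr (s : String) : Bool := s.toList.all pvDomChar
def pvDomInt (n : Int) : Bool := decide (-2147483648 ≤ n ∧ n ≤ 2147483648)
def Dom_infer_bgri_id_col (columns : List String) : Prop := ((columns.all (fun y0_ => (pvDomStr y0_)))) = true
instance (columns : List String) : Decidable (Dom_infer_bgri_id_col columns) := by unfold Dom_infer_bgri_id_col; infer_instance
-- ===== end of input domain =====

-- B merges A's membership test and scan into one pass with a first-match accumulator (objective: simpler).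

-- ===== PORT A =====
-- the for-loop of A: first column whose upper-case form contains "BGRI"; "" stands for the raise (outside Pre_)
def inferLoopA : List String → String
  | [] => ""
  | c :: rest =>
    if PySem.Str.isIn "BGRI" (PySem.Str.upper c) then c else inferLoopA rest

def infer_bgri_id_col (columns : List String) : String :=
  if columns.contains "BGRI2021" then "BGRI2021" else inferLoopA columns

-- ===== PORT B =====
-- B's single pass with the first_match accumulator; "" stands for the raise (outside Pre_)
def inferLoopB : List String → Option String → String
  | [], firstMatch => firstMatch.getD ""
  | c :: rest, firstMatch =>
    if c == "BGRI2021" then c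
    else inferLoopB rest
      (if firstMatch.isNone && PySem.Str.isIn "BGRI" (PySem.Str.upper c) then some c else firstMatch)

def infer_bgri_id_col_alt (columns : List String) : String :=
  inferLoopB columns none

-- ===== PRECONDITION & SPEC =====
-- Pre_ excludes exactly the inputs where A raises ValueError: no column contains "BGRI" in upper case.
def Pre_infer_bgri_id_col (columns : List String) : Prop :=
  ∃ c ∈ columns, PySem.Str.isIn "BGRI" (PySem.Str.upper c) = true
instance (columns : List String) : Decidable (Pre_infer_bgri_id_col columns) := by
  unfold Pre_infer_bgri_id_col; infer_instance

def pvWitness_infer_bgri_id_col : List String := ["area", "bgri_id"]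

def Spec_infer_bgri_id_col (columns : List String) (out : String) : Prop := out = infer_bgri_id_col_alt columns
instance (columns : List String) (out : String) : Decidable (Spec_infer_bgri_id_col columns out) := by unfold Spec_infer_bgri_id_col; infer_instance

-- ===== CLAIM (what is proved, stated in full; the proofs are below) =====
def Claim_equal_infer_bgri_id_col : Prop := ∀ (columns : List String), Dom_infer_bgri_id_col columns → Pre_infer_bgri_id_col columns → Spec_infer_bgri_id_col columns (infer_bgri_id_col columns)

-- ===== LEMMAS AND PROOFS =====

-- if the exact name occurs, B's loop stops there (whatever the accumulator holds)
theorem inferLoopB_of_mem (cols : List String) (h : "BGRI2021" ∈ cols) :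
    ∀ firstMatch, inferLoopB cols firstMatch = "BGRI2021" := by
  induction cols with
  | nil => cases h
  | cons c rest ih =>
    intro firstMatch
    by_cases hc : c = "BGRI2021"
    · simp [inferLoopB, hc]
    · have hr : "BGRI2021" ∈ rest := by
        cases h with
        | head => exact absurd rfl hc
        | tail _ hm => exact hm
      simp [inferLoopB, hc, ih hr]

-- once first_match is set and the exact name is absent, B's loop returns it
theorem inferLoopB_some (cols : List String) (h : "BGRI2021" ∉ cols) (f : String) :
    inferLoopB cols (some f) = f := by
  induction cols with
  | nil => rfl
  | cons c rest ih =>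
    have hc : c ≠ "BGRI2021" := fun hc => h (hc ▸ List.mem_cons_self)
    have hr : "BGRI2021" ∉ rest := fun hm => h (List.mem_cons_of_mem _ hm)
    simp [inferLoopB, hc, ih hr]

-- with an empty accumulator and no exact name, B's loop computes A's loop
theorem inferLoopB_none (cols : List String) (h : "BGRI2021" ∉ cols) :
    inferLoopB cols none = inferLoopA cols := by
  induction cols with
  | nil => rfl
  | cons c rest ih =>
    have hc : c ≠ "BGRI2021" := fun hc => h (hc ▸ List.mem_cons_self)
    have hr : "BGRI2021" ∉ rest := fun hm => h (List.mem_cons_of_mem _ hm)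
    by_cases hhit : PySem.Chars.isIn ['B', 'G', 'R', 'I'] (PySem.Chars.upper c.toList) = true
    · simp [inferLoopB, inferLoopA, hc, hhit, inferLoopB_some rest hr]
    · simp [inferLoopB, inferLoopA, hc, hhit, ih hr]

-- ===== VERDICT (by name: the statement is the Claim_ definition above) =====
theorem infer_bgri_id_col_spec : Claim_equal_infer_bgri_id_col := by
  intro columns _ _
  unfold Spec_infer_bgri_id_col infer_bgri_id_col infer_bgri_id_col_alt
  by_cases hm : "BGRI2021" ∈ columns
  · simp [hm, inferLoopB_of_mem columns hm]
  · simp [hm, inferLoopB_none columns hm]
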